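-- pv_equiv track=rewrite | github.com/google-research/vmoe | vmoe/checkpoints/partitioned.py | _remove_unused_shards
-- ===== SOURCE A (Python) =====
-- from typing import Any, Iterator, Iterable, Mapping, Optional, Sequence, Tuple, Union
--
-- def _remove_unused_shards(
--     shard_per_slices: Sequence[Sequence[int]],
--     process_per_shard: Tuple[int, ...],
-- ) -> Tuple[Sequence[Sequence[int]], Tuple[int, ...]]:
--   """Removes unused shards from the inputs."""
--   old_to_new_shard_map = {}
--   process_per_shard_new = []
--   shard_per_slices_new = []
--   for shard_per_slice in shard_per_slices:
--     shard_per_slice_new = []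
--     for shard_index in shard_per_slice:
--       if shard_index in old_to_new_shard_map:
--         new_shard_index = old_to_new_shard_map[shard_index]
--       else:
--         new_shard_index = len(old_to_new_shard_map)
--         old_to_new_shard_map[shard_index] = new_shard_index
--         process_per_shard_new.append(process_per_shard[shard_index])
--       shard_per_slice_new.append(new_shard_index)
--     shard_per_slices_new.append(shard_per_slice_new)
--   return shard_per_slices_new, tuple(process_per_shard_new)
-- ===== SOURCE B (Python) =====
-- def _remove_unused_shards(shard_per_slices, process_per_shard):
--   """Removes unused shards (sort-based re-implementation).
--
--   The compact numbering is recovered by SORTING the set of used shards by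
--   their first-occurrence position in the flattened stream: that order is
--   exactly first-appearance order, so the result equals A's.
--   """
--   flat = [i for slc in shard_per_slices for i in slc]
--   order = sorted(set(flat), key=flat.index)
--   new = {x: k for k, x in enumerate(order)}
--   return ([[new[i] for i in slc] for slc in shard_per_slices],
--           tuple(process_per_shard[x] for x in order))
-- ===== Notes on version B (the rewrite author's own statement) =====
-- stated objective: alternative
-- what changed: Replaces A's single fused pass that threads a dict and two growing output lists through every element by a sort-based pipeline: flatten, dedup with set(), establish the compact order by sorting the distinct shards by first-occurrence position (flat.index), then remap slices through an enumerate-built table.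
import Mathlib
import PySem

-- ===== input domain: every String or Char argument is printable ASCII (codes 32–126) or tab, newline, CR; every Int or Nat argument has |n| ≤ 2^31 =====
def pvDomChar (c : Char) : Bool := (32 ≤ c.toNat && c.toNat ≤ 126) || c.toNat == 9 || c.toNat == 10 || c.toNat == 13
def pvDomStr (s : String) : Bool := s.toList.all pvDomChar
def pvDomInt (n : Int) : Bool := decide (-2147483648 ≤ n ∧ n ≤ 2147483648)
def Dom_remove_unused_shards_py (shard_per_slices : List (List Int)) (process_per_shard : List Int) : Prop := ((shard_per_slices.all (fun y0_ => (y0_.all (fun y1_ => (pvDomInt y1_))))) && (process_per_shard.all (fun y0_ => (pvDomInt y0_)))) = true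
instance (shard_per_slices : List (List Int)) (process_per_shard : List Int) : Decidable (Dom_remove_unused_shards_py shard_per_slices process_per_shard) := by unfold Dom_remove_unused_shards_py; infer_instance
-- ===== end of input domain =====

-- B replaces A's single fused pass (dict + two growing outputs threaded through every element) by a
-- sort-based pipeline: flatten, dedup with set(), sort the distinct shards by first-occurrence position,
-- then remap through an enumerate-built table; objective: an alternative algorithm, not speed.

-- ===== PORT A =====
def remove_unused_shards_py (shard_per_slices : List (List Int)) (process_per_shard : List Int) : List (List Int) × List Int :=
  let st := shard_per_slices.foldl
    (fun (st : PySem.Dict Int Int × List Int × List (List Int)) shard_per_slice =>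
      let inner := shard_per_slice.foldl
        (fun (st2 : PySem.Dict Int Int × List Int × List Int) shard_index =>
          if st2.1.contains shard_index then
            (st2.1, st2.2.1, st2.2.2 ++ [st2.1.getD shard_index 0])
          else
            (st2.1.insert shard_index (st2.1.size : Int),
             st2.2.1 ++ [PySem.List.pyGetD process_per_shard shard_index 0],
             st2.2.2 ++ [(st2.1.size : Int)]))
        (st.1, st.2.1, ([] : List Int))
      (inner.1, inner.2.1, st.2.2 ++ [inner.2.2]))
    (PySem.Dict.empty, ([] : List Int), ([] : List (List Int)))
  (st.2.2, st.2.1)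

-- ===== PORT B =====
def remove_unused_shards_py_alt (shard_per_slices : List (List Int)) (process_per_shard : List Int) : List (List Int) × List Int :=
  let flat := shard_per_slices.flatMap (fun slc => slc)
  -- sorted(set(flat), key=flat.index): key is injective on the set, so the result is independent of
  -- Python's set iteration order; flat.index is total on members, ported as index? with getD.
  let order := PySem.List.sorted (PySem.Set.ofList flat)
    (fun x => (PySem.List.index? flat x).getD 0) false
  -- {x: k for k, x in enumerate(order)}
  let new := (PySem.List.enumerate order 0).foldl
    (fun (d : PySem.Dict Int Int) p => d.insert p.2 p.1) PySem.Dict.empty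
  -- new[i]: every i is a key of new, so getD with a default is exact here
  (shard_per_slices.map (fun slc => slc.map (fun i => new.getD i 0)),
   order.map (fun x => PySem.List.pyGetD process_per_shard x 0))

-- ===== PRECONDITION & SPEC =====
-- Pre_ excludes exactly the inputs on which Python A raises IndexError: some used shard index
-- is out of range for process_per_shard (Python-style, negative indices count from the end).
def Pre_remove_unused_shards_py (shard_per_slices : List (List Int)) (process_per_shard : List Int) : Prop :=
  ∀ slc ∈ shard_per_slices, ∀ i ∈ slc, PySem.Raise.InRange process_per_shard.length i
instance (shard_per_slices : List (List Int)) (process_per_shard : List Int) : Decidable (Pre_remove_unused_shards_py shard_per_slices process_per_shard) := by unfold Pre_remove_unused_shards_py; infer_instance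
def pvWitness_remove_unused_shards_py : List (List Int) × List Int := ([[0, 2, 0], [1]], [10, 20, 30])

def Spec_remove_unused_shards_py (shard_per_slices : List (List Int)) (process_per_shard : List Int) (out : List (List Int) × List Int) : Prop := out = remove_unused_shards_py_alt shard_per_slices process_per_shard
instance (shard_per_slices : List (List Int)) (process_per_shard : List Int) (out : List (List Int) × List Int) : Decidable (Spec_remove_unused_shards_py shard_per_slices process_per_shard out) := by unfold Spec_remove_unused_shards_py; infer_instance

-- ===== CLAIM (what is proved, stated in full; the proofs are below) =====
def Claim_equal_remove_unused_shards_py : Prop := ∀ (shard_per_slices : List (List Int)) (process_per_shard : List Int), Dom_remove_unused_shards_py shard_per_slices process_per_shard → Pre_remove_unused_shards_py shard_per_slices process_per_shard → Spec_remove_unused_shards_py shard_per_slices process_per_shard (remove_unused_shards_py shard_per_slices process_per_shard)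

-- ===== LEMMAS AND PROOFS =====

-- (x, position) pairs of a list, as a Dict items list
def encIdx (S : List Int) : List (Int × Int) := S.zipIdx.map (fun p => (p.1, (p.2 : Int)))

-- the new index both programs assign to an old shard index, relative to the flattened stream F
def gF (F : List Int) (i : Int) : Int := (((PySem.List.index? (PySem.List.dedup F) i).getD 0 : Nat) : Int)

theorem encIdx_append_singleton (S : List Int) (x : Int) :
    encIdx (S ++ [x]) = encIdx S ++ [(x, (S.length : Int))] := by
  simp [encIdx, List.zipIdx_append]

theorem foldl_add_extends (r : List Int) : ∀ (s : PySem.Set Int),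
    ∃ t, List.foldl PySem.Set.add s r = s ++ t := by
  induction r with
  | nil => intro s; exact ⟨[], by simp⟩
  | cons x r ih =>
    intro s
    by_cases h : x ∈ s
    · obtain ⟨t, ht⟩ := ih s
      refine ⟨t, ?_⟩
      have hadd : PySem.Set.add s x = s := by simp [PySem.Set.add, h]
      rw [List.foldl_cons, hadd, ht]
    · obtain ⟨t, ht⟩ := ih (s ++ [x])
      refine ⟨x :: t, ?_⟩
      have hadd : PySem.Set.add s x = s ++ [x] := by simp [PySem.Set.add, h]
      rw [List.foldl_cons, hadd, ht]
      simp

theorem dedup_prefix (l r : List Int) :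
    ∃ t, PySem.List.dedup (l ++ r) = PySem.List.dedup l ++ t := by
  simpa [PySem.List.dedup, PySem.Set.ofList, List.foldl_append]
    using foldl_add_extends r (List.foldl PySem.Set.add PySem.Set.empty l)

theorem dedup_append_mem (l : List Int) (x : Int) (hx : x ∈ l) :
    PySem.List.dedup (l ++ [x]) = PySem.List.dedup l := by
  have hc : x ∈ PySem.List.dedup l := (PySem.List.mem_dedup l x).2 hx
  simp only [PySem.List.dedup, PySem.Set.ofList, List.foldl_append, List.foldl_cons,
    List.foldl_nil, PySem.Set.add, PySem.Set.empty] at *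
  simp [hc]

theorem dedup_append_not_mem (l : List Int) (x : Int) (hx : x ∉ l) :
    PySem.List.dedup (l ++ [x]) = PySem.List.dedup l ++ [x] := by
  have hc : x ∉ PySem.List.dedup l := fun hmem => hx ((PySem.List.mem_dedup l x).1 hmem)
  simp only [PySem.List.dedup, PySem.Set.ofList, List.foldl_append, List.foldl_cons,
    List.foldl_nil, PySem.Set.add, PySem.Set.empty] at *
  simp [hc]

theorem keys_of_enc (d : PySem.Dict Int Int) (S : List Int) (h : d.items = encIdx S) :
    d.keys = S := by
  simp [PySem.Dict.keys, h, encIdx, List.map_map, Function.comp_def]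

theorem contains_of_enc (d : PySem.Dict Int Int) (S : List Int) (h : d.items = encIdx S) (x : Int) :
    d.contains x = decide (x ∈ S) := by
  by_cases hx : x ∈ S
  · simp [hx, (PySem.Dict.contains_iff_mem_keys d x).2 (by rw [keys_of_enc d S h]; exact hx)]
  · simp only [hx, decide_false]
    by_contra hcon
    have := (PySem.Dict.contains_iff_mem_keys d x).1 (by revert hcon; cases d.contains x <;> simp)
    rw [keys_of_enc d S h] at this; exact hx this

theorem getD_of_enc (d : PySem.Dict Int Int) (S : List Int) (h : d.items = encIdx S)
    (hnd : S.Nodup) (x : Int) (hx : x ∈ S) :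
    d.getD x 0 = (((PySem.List.index? S x).getD 0 : Nat) : Int) := by
  obtain ⟨k, hk⟩ := Option.isSome_iff_exists.1 ((PySem.List.index?_isSome_iff S x).2 hx)
  obtain ⟨hklt, hSk, _⟩ := PySem.List.getElem_of_index?_eq_some hk
  have hmem : (x, (k : Int)) ∈ d.items := by
    rw [h]
    exact List.mem_map.2 ⟨(x, k), List.mem_zipIdx_iff_getElem?.2 (by simp [List.getElem?_eq_getElem hklt, hSk]), rfl⟩
  rw [PySem.Dict.getD_of_mem_items d hmem (by rw [keys_of_enc d S h]; exact hnd), hk]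
  rfl

theorem size_of_enc (d : PySem.Dict Int Int) (S : List Int) (h : d.items = encIdx S) :
    d.size = S.length := by
  simp [PySem.Dict.size, h, encIdx]

-- index into the full dedup agrees with index into a prefix's dedup, for seen elements
theorem index_dedup_prefix (seen r : List Int) (x : Int) (hx : x ∈ seen) :
    PySem.List.index? (PySem.List.dedup (seen ++ r)) x = PySem.List.index? (PySem.List.dedup seen) x := by
  obtain ⟨t, ht⟩ := dedup_prefix seen r
  rw [ht]
  exact PySem.List.index?_append_of_mem t ((PySem.List.mem_dedup seen x).2 hx)

theorem gF_of_new (seen r : List Int) (x : Int) (hx : x ∉ seen) :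
    gF (seen ++ x :: r) x = ((PySem.List.dedup seen).length : Int) := by
  have h1 : seen ++ x :: r = (seen ++ [x]) ++ r := by simp
  have h2 : PySem.List.index? (PySem.List.dedup ((seen ++ [x]) ++ r)) x
      = some (PySem.List.dedup seen).length := by
    obtain ⟨t, ht⟩ := dedup_prefix (seen ++ [x]) r
    rw [ht, dedup_append_not_mem seen x hx,
      PySem.List.index?_append_of_mem (t := t)
        (by simp),
      PySem.List.index?_append_singleton_self _ x (by simp [hx])]
  rw [gF, h1, h2]; rfl

theorem gF_of_seen (seen r : List Int) (x : Int) (hx : x ∈ seen) :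
    gF (seen ++ r) x = (((PySem.List.index? (PySem.List.dedup seen) x).getD 0 : Nat) : Int) := by
  rw [gF, index_dedup_prefix seen r x hx]

theorem inner_loop (pps F : List Int) :
    ∀ (slc seen r : List Int) (d : PySem.Dict Int Int) (ppsN acc : List Int),
    F = seen ++ slc ++ r →
    d.items = encIdx (PySem.List.dedup seen) →
    ppsN = (PySem.List.dedup seen).map (fun i => PySem.List.pyGetD pps i 0) →
    ∃ d' ppsN',
      slc.foldl
        (fun (st2 : PySem.Dict Int Int × List Int × List Int) shard_index =>
          if st2.1.contains shard_index then
            (st2.1, st2.2.1, st2.2.2 ++ [st2.1.getD shard_index 0])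
          else
            (st2.1.insert shard_index (st2.1.size : Int),
             st2.2.1 ++ [PySem.List.pyGetD pps shard_index 0],
             st2.2.2 ++ [(st2.1.size : Int)]))
        (d, ppsN, acc)
      = (d', ppsN', acc ++ slc.map (gF F)) ∧
      d'.items = encIdx (PySem.List.dedup (seen ++ slc)) ∧
      ppsN' = (PySem.List.dedup (seen ++ slc)).map (fun i => PySem.List.pyGetD pps i 0) := by
  intro slc
  induction slc with
  | nil =>
    intro seen r d ppsN acc _ h1 h2
    exact ⟨d, ppsN, by simp, by simpa using h1, by simpa using h2⟩
  | cons x rest ih =>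
    intro seen r d ppsN acc hF h1 h2
    by_cases hx : x ∈ seen
    · have hcont : d.contains x = true := by
        rw [contains_of_enc d _ h1]
        simp [hx]
      have hval : d.getD x 0 = gF F x := by
        rw [getD_of_enc d _ h1 (PySem.List.nodup_dedup seen) x ((PySem.List.mem_dedup seen x).2 hx)]
        rw [hF, show seen ++ (x :: rest) ++ r = seen ++ (x :: rest ++ r) by simp,
          gF_of_seen seen (x :: rest ++ r) x hx]
      obtain ⟨d', ppsN', heq, hi1, hi2⟩ :=
        ih (seen ++ [x]) r d ppsN (acc ++ [gF F x])
          (by rw [hF]; simp)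
          (by rw [dedup_append_mem seen x hx]; exact h1)
          (by rw [dedup_append_mem seen x hx]; exact h2)
      refine ⟨d', ppsN', ?_, ?_, ?_⟩
      · rw [List.foldl_cons]
        simp only [hcont, if_true, hval]
        rw [heq]; simp
      · rw [hi1]; simp
      · rw [hi2]; simp
    · have hcont : d.contains x = false := by
        rw [contains_of_enc d _ h1]
        simp [hx]
      have hsz : (d.size : Int) = ((PySem.List.dedup seen).length : Int) := by
        rw [size_of_enc d _ h1]
      have hval : (d.size : Int) = gF F x := by
        rw [hsz, hF, show seen ++ (x :: rest) ++ r = seen ++ (x :: (rest ++ r)) by simp,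
          gF_of_new seen (rest ++ r) x hx]
      obtain ⟨d', ppsN', heq, hi1, hi2⟩ :=
        ih (seen ++ [x]) r (d.insert x (gF F x))
          (ppsN ++ [PySem.List.pyGetD pps x 0]) (acc ++ [gF F x])
          (by rw [hF]; simp)
          (by rw [PySem.Dict.items_insert_of_not_contains d _ hcont, h1,
                dedup_append_not_mem seen x hx, encIdx_append_singleton, ← hval, hsz])
          (by rw [dedup_append_not_mem seen x hx, h2]; simp)
      refine ⟨d', ppsN', ?_, ?_, ?_⟩
      · rw [List.foldl_cons]
        simp only [hcont, if_false, Bool.false_eq_true, hval]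
        rw [heq]; simp
      · rw [hi1]; simp
      · rw [hi2]; simp

theorem outer_loop (pps F : List Int) :
    ∀ (spss : List (List Int)) (seen : List Int) (d : PySem.Dict Int Int) (ppsN : List Int)
      (accS : List (List Int)),
    F = seen ++ spss.flatMap (fun slc => slc) →
    d.items = encIdx (PySem.List.dedup seen) →
    ppsN = (PySem.List.dedup seen).map (fun i => PySem.List.pyGetD pps i 0) →
    ∃ d' ppsN',
      spss.foldl
        (fun (st : PySem.Dict Int Int × List Int × List (List Int)) shard_per_slice =>
          ((shard_per_slice.foldl
            (fun (st2 : PySem.Dict Int Int × List Int × List Int) shard_index =>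
              if st2.1.contains shard_index then
                (st2.1, st2.2.1, st2.2.2 ++ [st2.1.getD shard_index 0])
              else
                (st2.1.insert shard_index (st2.1.size : Int),
                 st2.2.1 ++ [PySem.List.pyGetD pps shard_index 0],
                 st2.2.2 ++ [(st2.1.size : Int)]))
            (st.1, st.2.1, ([] : List Int))).1,
           (shard_per_slice.foldl
            (fun (st2 : PySem.Dict Int Int × List Int × List Int) shard_index =>
              if st2.1.contains shard_index then
                (st2.1, st2.2.1, st2.2.2 ++ [st2.1.getD shard_index 0])
              else
                (st2.1.insert shard_index (st2.1.size : Int),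
                 st2.2.1 ++ [PySem.List.pyGetD pps shard_index 0],
                 st2.2.2 ++ [(st2.1.size : Int)]))
            (st.1, st.2.1, ([] : List Int))).2.1,
           st.2.2 ++ [(shard_per_slice.foldl
            (fun (st2 : PySem.Dict Int Int × List Int × List Int) shard_index =>
              if st2.1.contains shard_index then
                (st2.1, st2.2.1, st2.2.2 ++ [st2.1.getD shard_index 0])
              else
                (st2.1.insert shard_index (st2.1.size : Int),
                 st2.2.1 ++ [PySem.List.pyGetD pps shard_index 0],
                 st2.2.2 ++ [(st2.1.size : Int)]))
            (st.1, st.2.1, ([] : List Int))).2.2]))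
        (d, ppsN, accS)
      = (d', ppsN', accS ++ spss.map (fun slc => slc.map (gF F))) ∧
      ppsN' = (PySem.List.dedup F).map (fun i => PySem.List.pyGetD pps i 0) := by
  intro spss
  induction spss with
  | nil =>
    intro seen d ppsN accS hF h1 h2
    exact ⟨d, ppsN, by simp, by rw [h2, hF]; simp⟩
  | cons slc rest ih =>
    intro seen d ppsN accS hF h1 h2
    obtain ⟨d1, pps1, heq1, hj1, hj2⟩ :=
      inner_loop pps F slc seen (rest.flatMap (fun s => s)) d ppsN []
        (by rw [hF]; simp) h1 h2
    obtain ⟨d', ppsN', heq, hfin⟩ :=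
      ih (seen ++ slc) d1 pps1 (accS ++ [slc.map (gF F)])
        (by rw [hF]; simp) hj1 hj2
    refine ⟨d', ppsN', ?_, hfin⟩
    rw [List.foldl_cons]
    simp only [heq1, List.nil_append]
    rw [heq]; simp

-- ===== B-side lemmas =====

-- along dedup F, first-occurrence positions in F strictly increase
theorem pairwise_dedup_idx (l : List Int) :
    (PySem.List.dedup l).Pairwise
      (fun a b => (PySem.List.index? l a).getD 0 < (PySem.List.index? l b).getD 0) := by
  induction l using List.reverseRecOn with
  | nil => simp [PySem.List.dedup, PySem.Set.ofList, PySem.Set.empty]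
  | append_singleton l x ih =>
    by_cases hx : x ∈ l
    · rw [dedup_append_mem l x hx]
      refine ih.imp_of_mem ?_
      intro a b ha hb hab
      have ha' := (PySem.List.mem_dedup l a).1 ha
      have hb' := (PySem.List.mem_dedup l b).1 hb
      rwa [PySem.List.index?_append_of_mem [x] ha', PySem.List.index?_append_of_mem [x] hb']
    · rw [dedup_append_not_mem l x hx]
      refine (List.pairwise_append).2 ⟨?_, by simp, ?_⟩
      · refine ih.imp_of_mem ?_
        intro a b ha hb hab
        have ha' := (PySem.List.mem_dedup l a).1 ha
        have hb' := (PySem.List.mem_dedup l b).1 hb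
        rwa [PySem.List.index?_append_of_mem [x] ha', PySem.List.index?_append_of_mem [x] hb']
      · intro a ha b hb
        rcases List.mem_singleton.1 hb with rfl
        have ha' := (PySem.List.mem_dedup l a).1 ha
        obtain ⟨k, hk⟩ := Option.isSome_iff_exists.1 ((PySem.List.index?_isSome_iff l a).2 ha')
        obtain ⟨hklt, _, _⟩ := PySem.List.getElem_of_index?_eq_some hk
        rw [PySem.List.index?_append_of_mem [b] ha', hk,
          PySem.List.index?_append_singleton_self l b hx]
        simpa using hklt

-- sorted(set(flat), key=flat.index) is exactly the first-appearance dedup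
theorem sorted_eq_dedup (flat : List Int) :
    PySem.List.sorted (PySem.Set.ofList flat)
      (fun x => (PySem.List.index? flat x).getD 0) false = PySem.List.dedup flat := by
  refine PySem.List.sorted_eq_of_perm_of_pairwise_lt _ _ _ ?_ (pairwise_dedup_idx flat)
  rw [← PySem.List.dedup_eq_ofList]

-- the enumerate-built dict of a nodup list has items encIdx
theorem items_enum_fold (l : List Int) (hnd : l.Nodup) :
    ((PySem.List.enumerate l 0).foldl
      (fun (d : PySem.Dict Int Int) p => d.insert p.2 p.1) PySem.Dict.empty).items
    = encIdx l := by
  induction l using List.reverseRecOn with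
  | nil => simp [PySem.List.enumerate, encIdx]; rfl
  | append_singleton l x ih =>
    have hnd' : l.Nodup := (List.nodup_append.1 hnd).1
    have hx : x ∉ l := by
      intro hmem
      exact (List.nodup_append.1 hnd).2.2 x hmem x (List.mem_singleton_self x) rfl
    have hih := ih hnd'
    rw [PySem.List.enumerate_append, List.foldl_append]
    have hsing : PySem.List.enumerate [x] (0 + (l.length : Int)) = [((l.length : Int), x)] := by
      simp [PySem.List.enumerate]
    rw [hsing, List.foldl_cons, List.foldl_nil]
    have hcont : ((PySem.List.enumerate l 0).foldl
        (fun (d : PySem.Dict Int Int) p => d.insert p.2 p.1) PySem.Dict.empty).contains x = false := by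
      rw [contains_of_enc _ l hih]
      simp [hx]
    rw [PySem.Dict.items_insert_of_not_contains _ _ hcont, hih, encIdx_append_singleton]

-- ===== VERDICT (by name: the statement is the Claim_ definition above) =====
theorem remove_unused_shards_py_spec : Claim_equal_remove_unused_shards_py := by
  intro sps pps _ _
  unfold Spec_remove_unused_shards_py remove_unused_shards_py remove_unused_shards_py_alt
  obtain ⟨d', ppsN', heq, hpps⟩ :=
    outer_loop pps (sps.flatMap (fun slc => slc)) sps [] PySem.Dict.empty [] []
      (by simp) rfl rfl
  simp only [heq, hpps]
  have horder := sorted_eq_dedup (sps.flatMap (fun slc => slc))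
  rw [horder]
  have hitems := items_enum_fold (PySem.List.dedup (sps.flatMap (fun slc => slc)))
    (PySem.List.nodup_dedup _)
  refine Prod.ext ?_ rfl
  simp only [List.nil_append]
  refine List.map_congr_left ?_
  intro slc hslc
  refine List.map_congr_left ?_
  intro i hi
  have hiF : i ∈ sps.flatMap (fun s => s) := List.mem_flatMap.2 ⟨slc, hslc, hi⟩
  rw [getD_of_enc _ _ hitems (PySem.List.nodup_dedup _) i
    ((PySem.List.mem_dedup _ i).2 hiF)]
  rfl
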